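-- pv_equiv track=rewrite | github.com/huy2222/FillBlockGame_Group5 | FillBlock/SensorlessSearch.py | sensorless_full_path_search
-- ===== SOURCE A (Python) =====
-- def move(pos, action, N, white_cells):
--     x, y = pos[-1]
--
--     if action == "Up":
--         nx, ny = x-1, y
--     elif action == "Down":
--         nx, ny = x+1, y
--     elif action == "Left":
--         nx, ny = x, y-1
--     elif action == "Right":
--         nx, ny = x, y+1
--     else:
--         nx, ny = x, y
--
--     # kiểm tra ngoài lưới
--     if not (0 <= nx < N and 0 <= ny < N):
--         return None
--     # kiểm tra ô trắng
--     if (nx, ny) not in white_cells: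
--         return None
--     if (nx, ny) in pos:
--         return None
--
--     # Bỏ kiểm tra đi lại, cho phép quay lại
--     return pos + [(nx, ny)]
--
-- def apply_action_to_belief(belief, action, N, white_cells):
--     new_belief = set()
--     for path in belief:
--         new_path = move(list(path), action, N, white_cells)
--         if new_path is not None:
--             new_belief.add(tuple(new_path))  # tuple để hashable
--     if new_belief:
--         return frozenset(new_belief)
--     return None
--
-- def goal_test_path(belief, white_cells):
--     """
--     Trả về path duy nhất đạt mục tiêu, hoặc None nếu chưa có
--     """
--     for path in belief:
--         if set(path) == white_cells:
--             return path
--     return None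
--
-- def sensorless_full_path_search(start_pos, white_cells, N):
--     """
--     white_cells: danh sách hoặc set các ô trắng trên board
--     N: kích thước board (NxN)
--     """
--     actions = ["Up", "Down", "Left", "Right"]
--     # initial belief: robot có thể bắt đầu ở bất kỳ ô trắng nào
--     initial_belief = frozenset([tuple([start_pos])])
--
--     frontier = []
--     frontier.append(initial_belief)
--     explored = set()
--     step = 0
--
--     while frontier:
--         b = frontier.pop()
--         step += 1
--
--         goal_path = goal_test_path(b, set(white_cells))
--         if goal_path is not None:
--             return list(goal_path), step  # trả về duy nhất path đúng
--
--         explored.add(b)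
--
--         for a in actions:
--             b_prime = apply_action_to_belief(b, a, N, set(white_cells))
--             if b_prime is not None and b_prime not in explored:
--                 frontier.append(b_prime)
--
--     return None, step  # không tìm được đường đi
-- ===== SOURCE B (Python) =====
-- def sensorless_full_path_search(start_pos, white_cells, N):
--     """
--     white_cells: danh sach hoac set cac o trang tren board
--     N: kich thuoc board (NxN)
--     """
--     white = set(white_cells)
--     steps = 0
--
--     def dfs(path):
--         nonlocal steps
--         steps += 1
--         if set(path) == white:
--             return list(path)
--         x, y = path[-1]
--         for nxt in ((x, y + 1), (x, y - 1), (x + 1, y), (x - 1, y)):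
--             nx, ny = nxt
--             if 0 <= nx < N and 0 <= ny < N and nxt in white and nxt not in path:
--                 found = dfs(path + [nxt])
--                 if found is not None:
--                     return found
--         return None
--
--     return dfs([start_pos]), steps
-- ===== Notes on version B (the rewrite author's own statement) =====
-- stated objective: simpler
-- what changed: A's sensorless belief-state search (frozensets of paths on an explicit frontier stack with an explored set) is replaced by a direct recursive DFS over the current path, with one shared step counter and the white-cell set built once; the belief layer, the explored set and the per-iteration set(white_cells) rebuilds disappear.
import Mathlib
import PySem

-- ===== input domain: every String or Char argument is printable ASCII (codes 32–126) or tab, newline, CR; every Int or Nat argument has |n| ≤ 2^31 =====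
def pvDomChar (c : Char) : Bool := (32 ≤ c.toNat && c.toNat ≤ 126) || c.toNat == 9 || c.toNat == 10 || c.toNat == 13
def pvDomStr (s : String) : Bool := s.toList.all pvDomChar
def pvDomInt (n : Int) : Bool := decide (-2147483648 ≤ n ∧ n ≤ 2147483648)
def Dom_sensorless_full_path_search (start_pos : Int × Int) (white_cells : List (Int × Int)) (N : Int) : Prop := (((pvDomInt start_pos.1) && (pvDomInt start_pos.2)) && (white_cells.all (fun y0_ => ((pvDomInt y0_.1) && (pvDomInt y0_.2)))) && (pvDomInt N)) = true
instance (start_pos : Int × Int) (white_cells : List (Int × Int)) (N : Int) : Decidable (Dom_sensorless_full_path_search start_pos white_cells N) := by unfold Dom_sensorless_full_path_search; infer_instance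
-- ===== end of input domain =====

-- B drops A's belief-state machinery (every belief is a singleton) and does a plain
-- recursive DFS over simple paths; same result and same step count, proved equal below.

-- ===== PORT A =====
-- move(pos, action, N, white_cells): pos is nonempty at every call site, so the
-- `.getD (0, 0)` default for pos[-1] is never used.
def pvMove (pos : List (Int × Int)) (action : String) (N : Int) (white_cells : PySem.Set (Int × Int)) : Option (List (Int × Int)) :=
  let xy := (PySem.List.pyGet? pos (-1)).getD (0, 0)
  let nxy : Int × Int :=
    if action == "Up" then (xy.1 - 1, xy.2)
    else if action == "Down" then (xy.1 + 1, xy.2)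
    else if action == "Left" then (xy.1, xy.2 - 1)
    else if action == "Right" then (xy.1, xy.2 + 1)
    else (xy.1, xy.2)
  if ¬ (0 ≤ nxy.1 ∧ nxy.1 < N ∧ 0 ≤ nxy.2 ∧ nxy.2 < N) then none
  else if ¬ PySem.Set.contains white_cells nxy then none
  else if pos.contains nxy then none
  else some (pos ++ [nxy])

-- apply_action_to_belief(belief, action, N, white_cells)
def pvApplyActionToBelief (belief : PySem.Set (List (Int × Int))) (action : String) (N : Int) (white_cells : PySem.Set (Int × Int)) : Option (PySem.Set (List (Int × Int))) :=
  let newBelief := belief.foldl (fun acc path =>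
      match pvMove path action N white_cells with
      | some np => PySem.Set.add acc np
      | none => acc) PySem.Set.empty
  if newBelief.isEmpty then none else some newBelief

-- goal_test_path(belief, white_cells)
def pvGoalTestPath (belief : PySem.Set (List (Int × Int))) (white_cells : PySem.Set (Int × Int)) : Option (List (Int × Int)) :=
  belief.findSome? fun path => if PySem.Set.equal (PySem.Set.ofList path) white_cells then some path else none

set_option maxRecDepth 2048 in
-- the `while frontier` loop; the frontier stack keeps its TOP at the list head
-- (frontier.append = cons, frontier.pop() = take the head), and the Nat argument is a
-- fuel guard only: the fuel supplied at the call site exceeds the number of iterations.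
def pvLoopA (white_cells : List (Int × Int)) (N : Int) : Nat → List (PySem.Set (List (Int × Int))) → PySem.Set (PySem.Set (List (Int × Int))) → Int → (Option (List (Int × Int))) × Int
  | 0, _, _, step => (none, step)
  | _+1, [], _, step => (none, step)
  | fuel+1, b :: rest, explored, step =>
    let step1 := step + 1
    match pvGoalTestPath b (PySem.Set.ofList white_cells) with
    | some goalPath => (some goalPath, step1)
    | none =>
      let explored1 := PySem.Set.add explored b
      let frontier1 := ["Up", "Down", "Left", "Right"].foldl (fun acc a =>
          match pvApplyActionToBelief b a N (PySem.Set.ofList white_cells) with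
          | some bp => if ¬ PySem.Set.contains explored1 bp then bp :: acc else acc
          | none => acc) rest
      pvLoopA white_cells N fuel frontier1 explored1 step1

def sensorless_full_path_search (start_pos : Int × Int) (white_cells : List (Int × Int)) (N : Int) : (Option (List (Int × Int))) × Int :=
  pvLoopA white_cells N (4 ^ (white_cells.length + 2)) [[[start_pos]]] PySem.Set.empty 0

-- ===== PORT B =====
-- dfs(path) of Source B; the nonlocal step counter is threaded explicitly, and the Nat
-- argument is a fuel guard only (one unit per dfs entry; the call site supplies more
-- than the recursion can consume).  path is nonempty at every call, so the
-- `.getD (0, 0)` default for path[-1] is never used.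
mutual
def pvDfsB (white : PySem.Set (Int × Int)) (N : Int) : Nat → List (Int × Int) → Int → (Option (List (Int × Int))) × Int
  | 0, _, step => (none, step)
  | fuel+1, path, step =>
    let step1 := step + 1
    if PySem.Set.equal (PySem.Set.ofList path) white then (some path, step1)
    else
      let xy := (PySem.List.pyGet? path (-1)).getD (0, 0)
      pvTryB white N fuel [(xy.1, xy.2 + 1), (xy.1, xy.2 - 1), (xy.1 + 1, xy.2), (xy.1 - 1, xy.2)] path step1
termination_by fuel _ _ => (fuel, 0)
decreasing_by all_goals simp_wf; omega

-- the `for nxt in (...)` loop of dfs, with early return on a found path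
def pvTryB (white : PySem.Set (Int × Int)) (N : Int) : Nat → List (Int × Int) → List (Int × Int) → Int → (Option (List (Int × Int))) × Int
  | _, [], _, step => (none, step)
  | fuel, c :: cs, path, step =>
    if 0 ≤ c.1 ∧ c.1 < N ∧ 0 ≤ c.2 ∧ c.2 < N ∧ PySem.Set.contains white c ∧ ¬ path.contains c then
      match pvDfsB white N fuel (path ++ [c]) step with
      | (some found, s) => (some found, s)
      | (none, s) => pvTryB white N (fuel - (s - step).toNat) cs path s
    else
      pvTryB white N fuel cs path step
termination_by fuel cs _ _ => (fuel, cs.length + 1)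
decreasing_by all_goals simp_wf; omega
end

def sensorless_full_path_search_alt (start_pos : Int × Int) (white_cells : List (Int × Int)) (N : Int) : (Option (List (Int × Int))) × Int :=
  pvDfsB (PySem.Set.ofList white_cells) N (4 ^ (white_cells.length + 2)) [start_pos] 0

-- ===== PRECONDITION & SPEC =====
def Spec_sensorless_full_path_search (start_pos : Int × Int) (white_cells : List (Int × Int)) (N : Int) (out : (Option (List (Int × Int))) × Int) : Prop := out = sensorless_full_path_search_alt start_pos white_cells N
instance (start_pos : Int × Int) (white_cells : List (Int × Int)) (N : Int) (out : (Option (List (Int × Int))) × Int) : Decidable (Spec_sensorless_full_path_search start_pos white_cells N out) := by unfold Spec_sensorless_full_path_search; infer_instance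

-- ===== CLAIM (what is proved, stated in full; the proofs are below) =====
def Claim_equal_sensorless_full_path_search : Prop := ∀ (start_pos : Int × Int) (white_cells : List (Int × Int)) (N : Int), Dom_sensorless_full_path_search start_pos white_cells N → Spec_sensorless_full_path_search start_pos white_cells N (sensorless_full_path_search start_pos white_cells N)

-- ===== LEMMAS AND PROOFS =====

-- -------- proof-only helpers --------

-- the four candidate next cells of a path, in B's visiting order (= A's pop order)
def pvCands (path : List (Int × Int)) : List (Int × Int) :=
  let xy := (PySem.List.pyGet? path (-1)).getD (0, 0)
  [(xy.1, xy.2 + 1), (xy.1, xy.2 - 1), (xy.1 + 1, xy.2), (xy.1 - 1, xy.2)]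

-- the path extended to cell c, if c is a legal fresh white cell
def pvMoveTo (path : List (Int × Int)) (N : Int) (white : PySem.Set (Int × Int)) (c : Int × Int) : Option (List (Int × Int)) :=
  if 0 ≤ c.1 ∧ c.1 < N ∧ 0 ≤ c.2 ∧ c.2 < N ∧ PySem.Set.contains white c ∧ ¬ path.contains c
  then some (path ++ [c]) else none

-- the extended paths a node spawns, among a candidate list
def pvKids (white : PySem.Set (Int × Int)) (N : Int) (path : List (Int × Int)) (cands : List (Int × Int)) : List (List (Int × Int)) :=
  cands.filterMap (pvMoveTo path N white)

-- A's loop with the belief layer and the (never firing) explored filter stripped away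
def pvPlain (wc : List (Int × Int)) (N : Int) : Nat → List (List (Int × Int)) → Int → (Option (List (Int × Int))) × Int
  | 0, _, step => (none, step)
  | _+1, [], step => (none, step)
  | fuel+1, p :: ps, step =>
    let step1 := step + 1
    if PySem.Set.equal (PySem.Set.ofList p) (PySem.Set.ofList wc) then (some p, step1)
    else pvPlain wc N fuel (pvKids (PySem.Set.ofList wc) N p (pvCands p) ++ ps) step1

-- invariant of A's loop: frontier paths are distinct, unexplored, and every recorded
-- path is either a one-cell path or a one-step extension of an explored path
def pvGood (E : List (List (Int × Int))) (p : List (Int × Int)) : Prop :=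
  p ≠ [] ∧ (p.dropLast ∈ E ∨ p.length = 1)

def pvInv (ps E : List (List (Int × Int))) : Prop :=
  ps.Nodup ∧ (∀ p ∈ ps, p ∉ E) ∧ (∀ p ∈ ps, pvGood E p) ∧ (∀ p ∈ E, pvGood E p)

-- -------- small bridges --------

lemma pvPlain_nil (wc : List (Int × Int)) (N : Int) (fuel : Nat) (step : Int) :
    pvPlain wc N fuel [] step = (none, step) := by cases fuel <;> rfl

lemma pvGoalTest_singleton (p : List (Int × Int)) (w : PySem.Set (Int × Int)) :
    pvGoalTestPath [p] w = if PySem.Set.equal (PySem.Set.ofList p) w then some p else none := by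
  simp [pvGoalTestPath, List.findSome?]; split_ifs <;> simp_all

lemma pvApply_singleton (p : List (Int × Int)) (a : String) (N : Int) (w : PySem.Set (Int × Int)) :
    pvApplyActionToBelief [p] a N w = (pvMove p a N w).map (fun q => [q]) := by
  cases h : pvMove p a N w <;>
    simp [pvApplyActionToBelief, h, PySem.Set.add, PySem.Set.empty]

lemma pvMove_chain (p : List (Int × Int)) (N : Int) (w : PySem.Set (Int × Int)) (c : Int × Int) :
    (if ¬ (0 ≤ c.1 ∧ c.1 < N ∧ 0 ≤ c.2 ∧ c.2 < N) then (none : Option (List (Int × Int)))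
     else if ¬ PySem.Set.contains w c then none
     else if p.contains c then none
     else some (p ++ [c])) = pvMoveTo p N w c := by
  rw [pvMoveTo]; split_ifs <;> tauto

lemma pvMove_up (p : List (Int × Int)) (N : Int) (w : PySem.Set (Int × Int)) :
    pvMove p "Up" N w = pvMoveTo p N w (((PySem.List.pyGet? p (-1)).getD (0, 0)).1 - 1, ((PySem.List.pyGet? p (-1)).getD (0, 0)).2) := by
  simp only [pvMove, show (("Up" : String) == "Up") = true from rfl, if_true]
  exact pvMove_chain p N w (((PySem.List.pyGet? p (-1)).getD (0, 0)).1 - 1, ((PySem.List.pyGet? p (-1)).getD (0, 0)).2)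

lemma pvMove_down (p : List (Int × Int)) (N : Int) (w : PySem.Set (Int × Int)) :
    pvMove p "Down" N w = pvMoveTo p N w (((PySem.List.pyGet? p (-1)).getD (0, 0)).1 + 1, ((PySem.List.pyGet? p (-1)).getD (0, 0)).2) := by
  simp only [pvMove, show (("Down" : String) == "Up") = false from rfl,
    show (("Down" : String) == "Down") = true from rfl, if_true, Bool.false_eq_true, if_false]
  exact pvMove_chain p N w (((PySem.List.pyGet? p (-1)).getD (0, 0)).1 + 1, ((PySem.List.pyGet? p (-1)).getD (0, 0)).2)

lemma pvMove_left (p : List (Int × Int)) (N : Int) (w : PySem.Set (Int × Int)) :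
    pvMove p "Left" N w = pvMoveTo p N w (((PySem.List.pyGet? p (-1)).getD (0, 0)).1, ((PySem.List.pyGet? p (-1)).getD (0, 0)).2 - 1) := by
  simp only [pvMove, show (("Left" : String) == "Up") = false from rfl,
    show (("Left" : String) == "Down") = false from rfl,
    show (("Left" : String) == "Left") = true from rfl, if_true, Bool.false_eq_true, if_false]
  exact pvMove_chain p N w (((PySem.List.pyGet? p (-1)).getD (0, 0)).1, ((PySem.List.pyGet? p (-1)).getD (0, 0)).2 - 1)

lemma pvMove_right (p : List (Int × Int)) (N : Int) (w : PySem.Set (Int × Int)) :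
    pvMove p "Right" N w = pvMoveTo p N w (((PySem.List.pyGet? p (-1)).getD (0, 0)).1, ((PySem.List.pyGet? p (-1)).getD (0, 0)).2 + 1) := by
  simp only [pvMove, show (("Right" : String) == "Up") = false from rfl,
    show (("Right" : String) == "Down") = false from rfl,
    show (("Right" : String) == "Left") = false from rfl,
    show (("Right" : String) == "Right") = true from rfl, if_true, Bool.false_eq_true, if_false]
  exact pvMove_chain p N w (((PySem.List.pyGet? p (-1)).getD (0, 0)).1, ((PySem.List.pyGet? p (-1)).getD (0, 0)).2 + 1)

-- A's push-fold over the four actions, when the explored filter never fires,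
-- pushes exactly the kids, in candidate order
lemma pvFold (w : PySem.Set (Int × Int)) (N : Int) (p : List (Int × Int))
    (E1 : PySem.Set (PySem.Set (List (Int × Int)))) (rest : List (PySem.Set (List (Int × Int))))
    (H : ∀ c ∈ pvKids w N p (pvCands p), ¬ PySem.Set.contains E1 [c]) :
    ["Up", "Down", "Left", "Right"].foldl (fun acc a =>
        match pvApplyActionToBelief [p] a N w with
        | some bp => if ¬ PySem.Set.contains E1 bp then bp :: acc else acc
        | none => acc) rest
      = (pvKids w N p (pvCands p)).map (fun q => [q]) ++ rest := by
  have hmem : ∀ c k, c ∈ pvCands p → pvMoveTo p N w c = some k → k ∈ pvKids w N p (pvCands p) := by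
    intro c k hc hk
    simp only [pvKids, List.mem_filterMap]
    exact ⟨c, hc, hk⟩
  simp only [List.foldl, pvApply_singleton, pvMove_up, pvMove_down, pvMove_left, pvMove_right]
  rcases hU : pvMoveTo p N w (((PySem.List.pyGet? p (-1)).getD (0, 0)).1 - 1, ((PySem.List.pyGet? p (-1)).getD (0, 0)).2) with _ | kU <;>
  rcases hD : pvMoveTo p N w (((PySem.List.pyGet? p (-1)).getD (0, 0)).1 + 1, ((PySem.List.pyGet? p (-1)).getD (0, 0)).2) with _ | kD <;>
  rcases hL : pvMoveTo p N w (((PySem.List.pyGet? p (-1)).getD (0, 0)).1, ((PySem.List.pyGet? p (-1)).getD (0, 0)).2 - 1) with _ | kL <;>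
  rcases hR : pvMoveTo p N w (((PySem.List.pyGet? p (-1)).getD (0, 0)).1, ((PySem.List.pyGet? p (-1)).getD (0, 0)).2 + 1) with _ | kR <;>
  simp only [Option.map_none, Option.map_some] <;>
  simp only [pvKids, pvCands, List.filterMap, hU, hD, hL, hR] <;>
  first
  | rfl
  | (repeat rw [if_pos])
    <;> first
      | rfl
      | (first
          | exact H _ (hmem _ _ (by simp [pvCands]) hR)
          | exact H _ (hmem _ _ (by simp [pvCands]) hL)
          | exact H _ (hmem _ _ (by simp [pvCands]) hD)
          | exact H _ (hmem _ _ (by simp [pvCands]) hU))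

-- -------- kid shape facts --------

lemma pvKids_shape {w : PySem.Set (Int × Int)} {N : Int} {p c : List (Int × Int)}
    {cands : List (Int × Int)} (h : c ∈ pvKids w N p cands) : ∃ q, c = p ++ [q] ∧ q ∉ p := by
  simp only [pvKids, List.mem_filterMap] at h
  obtain ⟨q, _, hq⟩ := h
  rw [pvMoveTo] at hq
  split_ifs at hq with hg
  cases hq
  exact ⟨q, rfl, by simpa using hg.2.2.2.2.2⟩

lemma pvKids_nodup (w : PySem.Set (Int × Int)) (N : Int) (p : List (Int × Int)) :
    (pvKids w N p (pvCands p)).Nodup := by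
  have hc : (pvCands p).Nodup := by
    have h4 : ∀ (x y : Int), ([(x, y + 1), (x, y - 1), (x + 1, y), (x - 1, y)] : List (Int × Int)).Nodup := by
      intro x y
      simp only [List.nodup_cons, List.mem_cons, List.not_mem_nil, or_false, Prod.mk.injEq,
        not_or, List.nodup_nil, and_true, not_and, not_false_iff]
      omega
    simpa [pvCands] using h4 _ _
  refine hc.filterMap ?_
  intro a a' b hb hb'
  rw [pvMoveTo] at hb hb'
  split_ifs at hb hb' <;> try simp_all
  have h1 : p ++ [a] = p ++ [a'] := by
    have hb1 : p ++ [a] = b := by simpa using hb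
    have hb2 : p ++ [a'] = b := by simpa using hb'
    rw [hb1, hb2]
  simpa using List.append_cancel_left h1

-- -------- invariant --------

lemma pvKids_not_mem_E {p c : List (Int × Int)} {ps E : List (List (Int × Int))}
    {w : PySem.Set (Int × Int)} {N : Int} (h : pvInv (p :: ps) E)
    (hc : c ∈ pvKids w N p (pvCands p)) : c ∉ E ++ [p] := by
  obtain ⟨q, rfl, _⟩ := pvKids_shape hc
  have hpE : p ∉ E := h.2.1 p (List.mem_cons_self)
  have hpne : p ≠ [] := (h.2.2.1 p (List.mem_cons_self)).1
  intro hmem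
  rcases List.mem_append.1 hmem with hE | hp
  · rcases (h.2.2.2 _ hE).2 with hd | hl
    · rw [List.dropLast_concat] at hd; exact hpE hd
    · have hlen : (p ++ [q]).length = p.length + 1 := by simp
      have hp0 : p.length = 0 := by omega
      exact hpne (List.length_eq_zero_iff.1 hp0)
  · simp only [List.mem_singleton] at hp
    have := congrArg List.length hp
    simp at this

lemma pvInv_step {p : List (Int × Int)} {ps E : List (List (Int × Int))}
    {w : PySem.Set (Int × Int)} {N : Int} (h : pvInv (p :: ps) E) :
    pvInv (pvKids w N p (pvCands p) ++ ps) (E ++ [p]) := by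
  obtain ⟨hnd, hdisj, hgoodF, hgoodE⟩ := h
  have hpE : p ∉ E := hdisj p (List.mem_cons_self)
  have hpne : p ≠ [] := (hgoodF p (List.mem_cons_self)).1
  have hKshape := fun {c} (hc : c ∈ pvKids w N p (pvCands p)) => pvKids_shape hc
  have hKps : ∀ c ∈ pvKids w N p (pvCands p), c ∉ ps := by
    intro c hc hcps
    obtain ⟨q, rfl, _⟩ := hKshape hc
    rcases (hgoodF _ (List.mem_cons_of_mem _ hcps)).2 with hd | hl
    · rw [List.dropLast_concat] at hd; exact hpE hd
    · have hlen : (p ++ [q]).length = p.length + 1 := by simp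
      have hp0 : p.length = 0 := by omega
      exact hpne (List.length_eq_zero_iff.1 hp0)
  refine ⟨?_, ?_, ?_, ?_⟩
  · rw [List.nodup_append]
    exact ⟨pvKids_nodup w N p, (List.nodup_cons.1 hnd).2,
      fun c hc b hb he => hKps c hc (he ▸ hb)⟩
  · intro x hx
    rcases List.mem_append.1 hx with hK | hps
    · exact pvKids_not_mem_E ⟨hnd, hdisj, hgoodF, hgoodE⟩ hK
    · intro hmem
      rcases List.mem_append.1 hmem with hE | hp
      · exact hdisj x (List.mem_cons_of_mem _ hps) hE
      · simp only [List.mem_singleton] at hp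
        exact (List.nodup_cons.1 hnd).1 (hp ▸ hps)
  · intro x hx
    rcases List.mem_append.1 hx with hK | hps
    · obtain ⟨q, rfl, _⟩ := hKshape hK
      exact ⟨by simp, Or.inl (by rw [List.dropLast_concat]; exact List.mem_append_right _ List.mem_cons_self)⟩
    · obtain ⟨h1, h2⟩ := hgoodF x (List.mem_cons_of_mem _ hps)
      exact ⟨h1, h2.imp_left (List.mem_append_left _)⟩
  · intro x hx
    rcases List.mem_append.1 hx with hE | hp
    · obtain ⟨h1, h2⟩ := hgoodE x hE
      exact ⟨h1, h2.imp_left (List.mem_append_left _)⟩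
    · simp only [List.mem_singleton] at hp
      subst hp
      obtain ⟨h1, h2⟩ := hgoodF x (List.mem_cons_self)
      exact ⟨h1, h2.imp_left (List.mem_append_left _)⟩

-- -------- A's loop = plain path DFS loop --------

lemma pvSim1 (wc : List (Int × Int)) (N : Int) :
    ∀ (fuel : Nat) (ps E : List (List (Int × Int))) (step : Int), pvInv ps E →
      pvLoopA wc N fuel (ps.map (fun p => [p])) (E.map (fun p => [p])) step
        = pvPlain wc N fuel ps step := by
  intro fuel
  induction fuel with
  | zero => intro ps E step _; rfl
  | succ fuel IH =>
    intro ps E step hinv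
    cases ps with
    | nil => rfl
    | cons p ps =>
      have hpE : p ∉ E := hinv.2.1 p (List.mem_cons_self)
      have hadd : PySem.Set.add (E.map (fun p => [p])) [p] = (E ++ [p]).map (fun p => [p]) := by
        simp [PySem.Set.add]
        exact hpE
      simp only [List.map, pvLoopA, pvGoalTest_singleton]
      by_cases hg : PySem.Set.equal (PySem.Set.ofList p) (PySem.Set.ofList wc) = true
      · simp [pvPlain, hg]
      · rw [if_neg hg]
        simp only [pvPlain, if_neg hg]
        rw [hadd, pvFold (PySem.Set.ofList wc) N p _ _ (by
          intro c hc
          rw [PySem.Set.contains_iff]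
          intro hmem
          obtain ⟨q, hq, he⟩ := List.mem_map.1 hmem
          cases he
          exact pvKids_not_mem_E hinv hc hq)]
        rw [← List.map_append]
        exact IH _ _ _ (pvInv_step hinv)

-- -------- plain loop = B's recursive DFS, with step accounting --------

lemma pvMaster (wc : List (Int × Int)) (N : Int) :
    ∀ (FUEL : Nat),
      (∀ (p : List (Int × Int)) (ps : List (List (Int × Int))) (step : Int),
        step ≤ (pvDfsB (PySem.Set.ofList wc) N FUEL p step).2 ∧
        pvPlain wc N FUEL (p :: ps) step =
          (match pvDfsB (PySem.Set.ofList wc) N FUEL p step with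
           | (some r, s) => (some r, s)
           | (none, s) => pvPlain wc N (FUEL - (s - step).toNat) ps s))
      ∧ (∀ fuel ≤ FUEL, ∀ (cands p : List (Int × Int)) (ps : List (List (Int × Int))) (step : Int),
        step ≤ (pvTryB (PySem.Set.ofList wc) N fuel cands p step).2 ∧
        pvPlain wc N fuel (pvKids (PySem.Set.ofList wc) N p cands ++ ps) step =
          (match pvTryB (PySem.Set.ofList wc) N fuel cands p step with
           | (some r, s) => (some r, s)
           | (none, s) => pvPlain wc N (fuel - (s - step).toNat) ps s)) := by
  intro FUEL
  induction FUEL using Nat.strong_induction_on with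
  | _ FUEL IH =>
  have hdfs : ∀ (p : List (Int × Int)) (ps : List (List (Int × Int))) (step : Int),
      step ≤ (pvDfsB (PySem.Set.ofList wc) N FUEL p step).2 ∧
      pvPlain wc N FUEL (p :: ps) step =
        (match pvDfsB (PySem.Set.ofList wc) N FUEL p step with
         | (some r, s) => (some r, s)
         | (none, s) => pvPlain wc N (FUEL - (s - step).toNat) ps s) := by
    cases FUEL with
    | zero =>
      intro p ps step
      refine ⟨by simp [pvDfsB], ?_⟩
      simp [pvDfsB, pvPlain]
    | succ f =>
      intro p ps step
      have htf := (IH f (Nat.lt_succ_self f)).2 f le_rfl (pvCands p) p ps (step + 1)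
      by_cases hg : PySem.Set.equal (PySem.Set.ofList p) (PySem.Set.ofList wc) = true
      · refine ⟨?_, ?_⟩
        · simp [pvDfsB, hg]
        · simp [pvDfsB, pvPlain, hg]
      · have hstep : pvDfsB (PySem.Set.ofList wc) N (f + 1) p step
            = pvTryB (PySem.Set.ofList wc) N f (pvCands p) p (step + 1) := by
          simp [pvDfsB, hg, pvCands]
        refine ⟨?_, ?_⟩
        · rw [hstep]; exact le_trans (by omega) htf.1
        · rw [hstep]
          have hL : pvPlain wc N (f + 1) (p :: ps) step
              = pvPlain wc N f (pvKids (PySem.Set.ofList wc) N p (pvCands p) ++ ps) (step + 1) := by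
            simp [pvPlain, hg]
          rw [hL, htf.2]
          rcases h1 : pvTryB (PySem.Set.ofList wc) N f (pvCands p) p (step + 1) with ⟨r1, s1⟩
          have hm := htf.1
          rw [h1] at hm
          cases r1 with
          | some r => rfl
          | none =>
            have : f - (s1 - (step + 1)).toNat = f + 1 - (s1 - step).toNat := by omega
            simp [this]
  have hdfsAll : ∀ g ≤ FUEL, ∀ (p : List (Int × Int)) (ps : List (List (Int × Int))) (step : Int),
      step ≤ (pvDfsB (PySem.Set.ofList wc) N g p step).2 ∧
      pvPlain wc N g (p :: ps) step =
        (match pvDfsB (PySem.Set.ofList wc) N g p step with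
         | (some r, s) => (some r, s)
         | (none, s) => pvPlain wc N (g - (s - step).toNat) ps s) := by
    intro g hg
    rcases Nat.lt_or_ge g FUEL with h | h
    · exact (IH g h).1
    · have : g = FUEL := le_antisymm hg h
      rw [this]; exact hdfs
  refine ⟨hdfs, ?_⟩
  intro fuel hf cands
  induction cands generalizing fuel with
  | nil =>
    intro p ps step
    refine ⟨by simp [pvTryB], ?_⟩
    simp [pvKids, pvTryB]
  | cons c cs ihc =>
    intro p ps step
    by_cases hgd : 0 ≤ c.1 ∧ c.1 < N ∧ 0 ≤ c.2 ∧ c.2 < N ∧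
        PySem.Set.contains (PySem.Set.ofList wc) c ∧ ¬ p.contains c
    · have hsome : pvMoveTo p N (PySem.Set.ofList wc) c = some (p ++ [c]) := by
        rw [pvMoveTo, if_pos hgd]
      have hK : pvKids (PySem.Set.ofList wc) N p (c :: cs)
          = (p ++ [c]) :: pvKids (PySem.Set.ofList wc) N p cs := by
        simp [pvKids, hsome]
      have hT0 : pvTryB (PySem.Set.ofList wc) N fuel (c :: cs) p step =
          (match pvDfsB (PySem.Set.ofList wc) N fuel (p ++ [c]) step with
           | (some found, s) => (some found, s)
           | (none, s) => pvTryB (PySem.Set.ofList wc) N (fuel - (s - step).toNat) cs p s) := by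
        rw [pvTryB, if_pos hgd]
      obtain ⟨hm1, he1⟩ := hdfsAll fuel hf (p ++ [c]) (pvKids (PySem.Set.ofList wc) N p cs ++ ps) step
      rcases h1 : pvDfsB (PySem.Set.ofList wc) N fuel (p ++ [c]) step with ⟨r1, s1⟩
      rw [h1] at hm1 he1
      rw [hT0, h1]
      cases r1 with
      | some r =>
        dsimp only at hm1 he1 ⊢
        refine ⟨hm1, ?_⟩
        rw [hK, List.cons_append, he1]
      | none =>
        dsimp only at hm1 he1 ⊢
        obtain ⟨hm2, he2⟩ := ihc (fuel - (s1 - step).toNat) (le_trans (Nat.sub_le _ _) hf) p ps s1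
        rcases h2 : pvTryB (PySem.Set.ofList wc) N (fuel - (s1 - step).toNat) cs p s1 with ⟨r2, s2⟩
        rw [h2] at hm2 he2
        dsimp only at hm2
        cases r2 with
        | some r =>
          dsimp only at he2 ⊢
          exact ⟨by omega, by rw [hK, List.cons_append, he1, he2]⟩
        | none =>
          dsimp only at he2 ⊢
          refine ⟨by omega, ?_⟩
          rw [hK, List.cons_append, he1, he2]
          have harith : fuel - (s1 - step).toNat - (s2 - s1).toNat = fuel - (s2 - step).toNat := by
            omega
          rw [harith]
    · have hnone : pvMoveTo p N (PySem.Set.ofList wc) c = none := by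
        rw [pvMoveTo, if_neg hgd]
      have hK : pvKids (PySem.Set.ofList wc) N p (c :: cs)
          = pvKids (PySem.Set.ofList wc) N p cs := by
        simp [pvKids, hnone]
      have hT : pvTryB (PySem.Set.ofList wc) N fuel (c :: cs) p step
          = pvTryB (PySem.Set.ofList wc) N fuel cs p step := by
        rw [pvTryB, if_neg hgd]
      rw [hK, hT]
      exact ihc fuel hf p ps step

-- ===== VERDICT (by name: the statement is the Claim_ definition above) =====
theorem sensorless_full_path_search_spec : Claim_equal_sensorless_full_path_search := by
  intro sp wc N _
  unfold Spec_sensorless_full_path_search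
  unfold sensorless_full_path_search sensorless_full_path_search_alt
  have h1 := pvSim1 wc N (4 ^ (wc.length + 2)) [[sp]] [] 0
    (by refine ⟨List.nodup_singleton _, ?_, ?_, ?_⟩ <;> simp [pvGood])
  have hempty : (PySem.Set.empty : PySem.Set (PySem.Set (List (Int × Int)))) = ([] : List (PySem.Set (List (Int × Int)))) := rfl
  rw [hempty]
  have h2 := (pvMaster wc N (4 ^ (wc.length + 2))).1 [sp] [] 0
  simp only [List.map] at h1
  rw [h1, h2.2]
  cases h : pvDfsB (PySem.Set.ofList wc) N (4 ^ (wc.length + 2)) [sp] 0 with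
  | mk r s => cases r <;> simp [pvPlain_nil]
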